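-- pv_equiv track=rewrite | github.com/lucas-s-p/EstudosPython | P1 - MTP6/q3.py | vogais_primeiro
-- ===== SOURCE A (Python) =====
-- def vogais_primeiro(frase):
--     saida = ''
--     saida2 = ''
--     for e in frase:
--         if e in "aeiou":
--             saida += e
--         else:
--             saida2 += e
--     saida_ = saida + saida2
--
--     return saida_
-- ===== SOURCE B (Python) =====
-- def vogais_primeiro(frase):
--     # Single stable sort by a boolean key: vowels (key False) come first,
--     # everything else after, each group in original order.
--     return ''.join(sorted(frase, key=lambda c: c not in "aeiou"))
-- ===== Notes on version B (the rewrite author's own statement) =====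
-- stated objective: idiomatic
-- what changed: Replaced the two-accumulator partition loop with a single stable sort of the characters keyed by whether the character is a non-vowel, joined back into a string.
import Mathlib
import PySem

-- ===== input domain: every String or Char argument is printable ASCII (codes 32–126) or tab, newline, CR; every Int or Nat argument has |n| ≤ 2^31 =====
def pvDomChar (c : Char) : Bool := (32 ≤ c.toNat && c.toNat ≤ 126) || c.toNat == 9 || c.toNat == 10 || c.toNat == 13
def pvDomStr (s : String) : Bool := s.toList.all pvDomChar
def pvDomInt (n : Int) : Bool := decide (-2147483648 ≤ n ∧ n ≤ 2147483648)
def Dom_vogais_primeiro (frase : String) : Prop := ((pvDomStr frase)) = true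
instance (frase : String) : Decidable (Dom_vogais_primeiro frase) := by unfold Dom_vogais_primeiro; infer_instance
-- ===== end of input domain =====

-- B replaces A's two-accumulator partition loop by one stable sort of the characters
-- by the boolean key "is not a vowel" (idiomatic one-liner); same return value.


-- ===== PORT A =====
-- A iterates the string once, appending each vowel to `saida` and every other
-- character to `saida2`, then returns saida + saida2.  Accumulators are kept as
-- List Char (exact for string concatenation of single chars on this domain).
def vogais_primeiro (frase : String) : String :=
  let p := frase.toList.foldl
    (fun (s : List Char × List Char) e =>
      if "aeiou".toList.contains e then (s.1 ++ [e], s.2) else (s.1, s.2 ++ [e]))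
    ([], [])
  String.ofList (p.1 ++ p.2)

-- ===== PORT B =====
-- Source B: ''.join(sorted(frase, key=lambda c: c not in "aeiou")).
-- Python's bool key (False < True) is ported as Nat 0/1, exactly its int order.
def vogais_primeiro_alt (frase : String) : String :=
  String.ofList (PySem.List.sorted frase.toList
    (fun c => if "aeiou".toList.contains c then (0 : Nat) else 1) false)

-- ===== PRECONDITION & SPEC =====
def Spec_vogais_primeiro (frase : String) (out : String) : Prop := out = vogais_primeiro_alt frase
instance (frase : String) (out : String) : Decidable (Spec_vogais_primeiro frase out) := by unfold Spec_vogais_primeiro; infer_instance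

-- ===== CLAIM (what is proved, stated in full; the proofs are below) =====
def Claim_equal_vogais_primeiro : Prop := ∀ (frase : String), Dom_vogais_primeiro frase → Spec_vogais_primeiro frase (vogais_primeiro frase)

-- ===== LEMMAS AND PROOFS =====

-- the boolean key used by B
def pvKey (c : Char) : Nat := if "aeiou".toList.contains c then 0 else 1

-- A's loop, started from (V, C), appends the vowels of xs to V and the rest to C.
theorem pvA_loop (xs : List Char) : ∀ (V C : List Char),
    xs.foldl
      (fun (s : List Char × List Char) e =>
        if "aeiou".toList.contains e then (s.1 ++ [e], s.2) else (s.1, s.2 ++ [e]))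
      (V, C)
    = (V ++ xs.filter (fun c => "aeiou".toList.contains c),
       C ++ xs.filter (fun c => !"aeiou".toList.contains c)) := by
  induction xs with
  | nil => intro V C; simp
  | cons x xs ih =>
    intro V C
    rw [List.foldl_cons, List.filter_cons, List.filter_cons]
    by_cases hx : "aeiou".toList.contains x = true
    · rw [if_pos hx, if_pos hx, if_neg (by rw [hx]; simp), ih]
      simp
    · rw [if_neg hx, if_neg hx, if_pos (by simp only [Bool.not_eq_true] at hx; rw [hx]; simp), ih]
      simp

-- extending a list keeps a pointwise key property
theorem pvAll_append {P : Char → Prop} {V : List Char} {x : Char}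
    (hV : ∀ v ∈ V, P v) (hx : P x) : ∀ v ∈ V ++ [x], P v := by
  intro v hv
  rcases List.mem_append.1 hv with h | h
  · exact hV v h
  · simp at h; exact h ▸ hx

-- inserting a vowel into (vowels ++ consonants) puts it at the end of the vowel block
theorem pvInsert_vowel (x : Char) (hx : pvKey x = 0) :
    ∀ (V C : List Char), (∀ v ∈ V, pvKey v = 0) → (∀ c ∈ C, pvKey c = 1) →
    PySem.List.insertBy (fun a b => decide (pvKey a < pvKey b)) x (V ++ C)
      = (V ++ [x]) ++ C := by
  intro V
  induction V with
  | nil =>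
    intro C _ hC
    cases C with
    | nil => simp [PySem.List.insertBy]
    | cons c cs =>
      have h1 : pvKey c = 1 := hC c (by simp)
      simp [PySem.List.insertBy, hx, h1]
  | cons v vs ih =>
    intro C hV hC
    have hv : pvKey v = 0 := hV v (by simp)
    have hrec := ih C (fun a ha => hV a (by simp [ha])) hC
    simp only [List.cons_append, PySem.List.insertBy, hx, hv, lt_irrefl, decide_false,
      Bool.false_eq_true, if_false, hrec]

-- inserting a consonant into any list of keys ≤ 1 appends it at the end
theorem pvInsert_cons (x : Char) (hx : pvKey x = 1) (ys : List Char)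
    (hy : ∀ y ∈ ys, pvKey y ≤ 1) :
    PySem.List.insertBy (fun a b => decide (pvKey a < pvKey b)) x ys = ys ++ [x] := by
  apply PySem.List.insertBy_of_forall_not_before
  intro y hyy
  have h1 := hy y hyy
  rw [hx]
  simp only [decide_eq_false_iff_not]
  omega

-- B's insertion-sort fold, started from vowels ++ consonants, stays partitioned.
theorem pvB_loop (xs : List Char) : ∀ (V C : List Char),
    (∀ v ∈ V, pvKey v = 0) → (∀ c ∈ C, pvKey c = 1) →
    xs.foldl (fun acc x => PySem.List.insertBy (fun a b => decide (pvKey a < pvKey b)) x acc)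
      (V ++ C)
    = (V ++ xs.filter (fun c => "aeiou".toList.contains c))
      ++ (C ++ xs.filter (fun c => !"aeiou".toList.contains c)) := by
  induction xs with
  | nil => intro V C _ _; simp
  | cons x xs ih =>
    intro V C hV hC
    rw [List.foldl_cons, List.filter_cons, List.filter_cons]
    by_cases hx : "aeiou".toList.contains x = true
    · have hk : pvKey x = 0 := by unfold pvKey; rw [if_pos hx]
      rw [pvInsert_vowel x hk V C hV hC,
        ih (V ++ [x]) C (pvAll_append hV hk) hC,
        if_pos hx, if_neg (by rw [hx]; simp)]
      simp
    · have hk : pvKey x = 1 := by unfold pvKey; rw [if_neg hx]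
      have happ : PySem.List.insertBy (fun a b => decide (pvKey a < pvKey b)) x (V ++ C)
          = V ++ (C ++ [x]) := by
        rw [pvInsert_cons x hk (V ++ C) ?_]
        · simp
        · intro y hy
          rcases List.mem_append.1 hy with h | h
          · rw [hV y h]; omega
          · rw [hC y h]
      rw [happ, ih V (C ++ [x]) hV (pvAll_append hC hk),
        if_neg hx, if_pos (by simp only [Bool.not_eq_true] at hx; rw [hx]; simp)]
      simp

-- ===== VERDICT (by name: the statement is the Claim_ definition above) =====
theorem vogais_primeiro_spec : Claim_equal_vogais_primeiro := by
  intro frase _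
  unfold Spec_vogais_primeiro vogais_primeiro vogais_primeiro_alt
  rw [show (fun c => if "aeiou".toList.contains c then (0 : Nat) else 1) = pvKey from rfl,
    PySem.List.sorted_eq_foldl_insertBy]
  have hB := pvB_loop frase.toList [] [] (by simp) (by simp)
  simp only [List.nil_append] at hB
  rw [hB, pvA_loop frase.toList [] []]
  simp
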